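-- pv_equiv track=rewrite | github.com/dako2/neurips_aihackercup | to_submit/Walk the Line.py | solve
-- ===== SOURCE A (Python) =====
-- def solve(N, K, S):
--     S.sort()
--     time = 0
--     crossed = 0
--     while crossed < N:
--         if crossed == N - 1:
--             time += S[crossed]
--             crossed += 1
--         elif crossed == N - 2:
--             time += S[crossed]
--             crossed += 2
--         else:
--             time += S[crossed + 1]
--             time += S[crossed]
--             crossed += 2
--     return time <= K
-- ===== SOURCE B (Python) =====
-- def solve(N, K, S):
--     # Closed form: crossing the first N (sorted) costs their sum, minus the
--     # largest of them when N is even (it rides along in the last pair).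
--     # Side effect note: unlike A, this does not sort S in place.
--     if N <= 0:
--         return 0 <= K
--     smallest = sorted(S)[:N]
--     total = sum(smallest)
--     if N % 2 == 0:
--         total -= smallest[-1]
--     return total <= K
-- ===== Notes on version B (the rewrite author's own statement) =====
-- stated objective: simpler
-- what changed: Replaces A's index-chasing while loop over crossed pairs by the closed form: answer = sum of the N smallest elements, minus the largest of them when N is even (a C-level sum instead of a Python-level loop with per-index branching); A sorts S in place while B does not (return-value equivalence only).
-- outside the precondition, e.g. on solve(4, 2, [7, 0, -1]): A returns False, B returns True
import Mathlib
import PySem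

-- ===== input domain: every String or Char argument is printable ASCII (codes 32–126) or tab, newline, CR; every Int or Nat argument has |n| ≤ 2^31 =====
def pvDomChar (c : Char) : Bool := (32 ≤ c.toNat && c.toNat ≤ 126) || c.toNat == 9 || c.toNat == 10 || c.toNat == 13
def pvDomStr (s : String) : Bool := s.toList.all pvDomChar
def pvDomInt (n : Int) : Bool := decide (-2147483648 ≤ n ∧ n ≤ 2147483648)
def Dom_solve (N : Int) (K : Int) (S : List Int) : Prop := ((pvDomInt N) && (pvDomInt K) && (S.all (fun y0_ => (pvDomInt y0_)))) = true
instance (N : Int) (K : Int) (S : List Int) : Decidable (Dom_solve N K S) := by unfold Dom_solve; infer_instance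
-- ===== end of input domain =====

-- B replaces A's pairwise while loop by the closed form (sum of the N smallest, minus their
-- largest when N is even); A sorts S in place, B does not — return-value equivalence only.

-- ===== PORT A =====
-- the while loop of A; state = (crossed, time); element access via pyGet? (getD 0 never
-- fires inside Pre_solve, where every index used is in range)
def solveLoopA (Nv : Int) (T : List Int) (crossed time : Int) : Int :=
  if _h : crossed < Nv then
    if crossed = Nv - 1 then
      solveLoopA Nv T (crossed + 1) (time + (PySem.List.pyGet? T crossed).getD 0)
    else if crossed = Nv - 2 then
      solveLoopA Nv T (crossed + 2) (time + (PySem.List.pyGet? T crossed).getD 0)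
    else
      solveLoopA Nv T (crossed + 2)
        ((time + (PySem.List.pyGet? T (crossed + 1)).getD 0) + (PySem.List.pyGet? T crossed).getD 0)
  else time
termination_by (Nv - crossed).toNat
decreasing_by all_goals omega

def solve (N : Int) (K : Int) (S : List Int) : Bool :=
  decide (solveLoopA N (PySem.List.sorted S (fun x => x) false) 0 0 ≤ K)

-- ===== PORT B =====
-- total for B: sum of `smallest`, minus its last element when N is even
def altTotal (N : Int) (smallest : List Int) : Int :=
  if N % 2 = 0 then smallest.sum - (PySem.List.pyGet? smallest (-1)).getD 0 else smallest.sum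

def solve_alt (N : Int) (K : Int) (S : List Int) : Bool :=
  if N ≤ 0 then decide ((0 : Int) ≤ K)
  else decide (altTotal N (PySem.List.slice (PySem.List.sorted S (fun x => x) false) none (some N)) ≤ K)

-- ===== PRECONDITION & SPEC =====
-- Pre_solve excludes N > len(S) (with N > 0), outside the problem's domain (N is the list's length):
-- there A usually raises IndexError, except when N is even and N = len(S)+1, where its pairing walk
-- happens to stay in range and returns a sum computed for a list one longer than S actually is.
def Pre_solve (N : Int) (K : Int) (S : List Int) : Prop := N ≤ S.length ∨ N ≤ 0
instance (N : Int) (K : Int) (S : List Int) : Decidable (Pre_solve N K S) := by unfold Pre_solve; infer_instance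
def pvWitness_solve : Int × Int × List Int := (3, 10, [3, 1, 2])

def Spec_solve (N : Int) (K : Int) (S : List Int) (out : Bool) : Prop := out = solve_alt N K S
instance (N : Int) (K : Int) (S : List Int) (out : Bool) : Decidable (Spec_solve N K S out) := by unfold Spec_solve; infer_instance

-- ===== CLAIM (what is proved, stated in full; the proofs are below) =====
def Claim_equal_solve : Prop := ∀ (N : Int) (K : Int) (S : List Int), Dom_solve N K S → Pre_solve N K S → Spec_solve N K S (solve N K S)

-- ===== LEMMAS AND PROOFS =====

-- closed form for the loop: from position c (0 ≤ c) it adds the elements T[c..N-1],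
-- skipping T[N-1] when N - c is even
lemma solveLoopA_closed (Nv : Int) (T : List Int) (crossed time : Int)
    (hc : 0 ≤ crossed) (hN : Nv ≤ T.length) :
    solveLoopA Nv T crossed time =
      time + ((T.take Nv.toNat).drop crossed.toNat).sum -
        (if crossed < Nv ∧ (Nv - crossed) % 2 = 0 then (PySem.List.pyGet? T (Nv - 1)).getD 0 else 0) := by
  by_cases h : crossed < Nv
  · have hlen : crossed.toNat < T.length := by omega
    have hget : PySem.List.pyGet? T crossed = some T[crossed.toNat] :=
      PySem.List.pyGet?_eq_some_getElem _ hc (by exact_mod_cast (by omega : crossed < (T.length : Int)))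
    have hdrop : (T.take Nv.toNat).drop crossed.toNat
        = T[crossed.toNat] :: (T.take Nv.toNat).drop (crossed.toNat + 1) := by
      have h1 : crossed.toNat < (T.take Nv.toNat).length := by
        simp [List.length_take]; omega
      rw [List.drop_eq_getElem_cons h1]
      congr 1
      simp [List.getElem_take]
    rw [solveLoopA]
    by_cases h1 : crossed = Nv - 1
    · -- last single element
      simp only [h, dif_pos, if_pos h1]
      rw [solveLoopA_closed Nv T (crossed + 1) _ (by omega) hN]
      have hstop : ¬ (crossed + 1 < Nv) := by omega
      have hc1 : (crossed + 1).toNat = crossed.toNat + 1 := by omega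
      have hd2 : (T.take Nv.toNat).drop (crossed.toNat + 1) = [] := by
        apply List.drop_eq_nil_of_le
        simp [List.length_take]; omega
      have hpar : ¬ ((Nv - crossed) % 2 = 0) := by omega
      rw [hget, hc1, hd2, hdrop, hd2]
      simp [hstop, hpar]
    · by_cases h2 : crossed = Nv - 2
      · -- last pair: only T[crossed] is added, T[Nv-1] skipped
        simp only [h, dif_pos, if_neg h1, if_pos h2]
        rw [solveLoopA_closed Nv T (crossed + 2) _ (by omega) hN]
        have hstop : ¬ (crossed + 2 < Nv) := by omega
        have hc2 : (crossed + 2).toNat = crossed.toNat + 2 := by omega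
        have hd3 : (T.take Nv.toNat).drop (crossed.toNat + 2) = [] := by
          apply List.drop_eq_nil_of_le
          simp [List.length_take]; omega
        have hlast : (T.take Nv.toNat).drop (crossed.toNat + 1) = [T[(Nv-1).toNat]] := by
          have h1' : crossed.toNat + 1 < (T.take Nv.toNat).length := by
            simp [List.length_take]; omega
          rw [List.drop_eq_getElem_cons h1']
          rw [show crossed.toNat + 1 + 1 = crossed.toNat + 2 from rfl, hd3]
          congr 1
          rw [List.getElem_take]
          congr 1
          omega
        have hgN : PySem.List.pyGet? T (Nv - 1) = some T[(Nv-1).toNat] :=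
          PySem.List.pyGet?_eq_some_getElem _ (by omega)
            (by exact_mod_cast (by omega : Nv - 1 < (T.length : Int)))
        have hpar : (Nv - crossed) % 2 = 0 := by omega
        rw [hget, hc2, hd3, hdrop, hlast, hgN]
        simp [hstop, hpar]
        ring
      · -- middle: both elements of the pair
        simp only [h, dif_pos, if_neg h1, if_neg h2]
        rw [solveLoopA_closed Nv T (crossed + 2) _ (by omega) hN]
        have hget1 : PySem.List.pyGet? T (crossed + 1) = some T[(crossed+1).toNat] :=
          PySem.List.pyGet?_eq_some_getElem _ (by omega)
            (by exact_mod_cast (by omega : crossed + 1 < (T.length : Int)))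
        have hdrop1 : (T.take Nv.toNat).drop (crossed.toNat + 1)
            = T[(crossed+1).toNat] :: (T.take Nv.toNat).drop (crossed.toNat + 2) := by
          have h1' : crossed.toNat + 1 < (T.take Nv.toNat).length := by
            simp [List.length_take]; omega
          rw [List.drop_eq_getElem_cons h1']
          congr 1
          rw [List.getElem_take]
          congr 1
          omega
        have hc2 : (crossed + 2).toNat = crossed.toNat + 2 := by omega
        have hcont : crossed + 2 < Nv := by omega
        have hpar : (Nv - (crossed + 2)) % 2 = (Nv - crossed) % 2 := by omega
        rw [hget, hget1, hc2, hdrop, hdrop1, hpar]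
        simp [hcont]
        ring
  · rw [solveLoopA]
    have hd : (T.take Nv.toNat).drop crossed.toNat = [] := by
      apply List.drop_eq_nil_of_le
      simp [List.length_take]; omega
    simp [h, hd]
termination_by (Nv - crossed).toNat
decreasing_by all_goals omega

-- ===== VERDICT (by name: the statement is the Claim_ definition above) =====
theorem solve_spec : Claim_equal_solve := by
  intro N K S _hdom hpre
  unfold Spec_solve solve solve_alt altTotal
  by_cases hN : N ≤ 0
  · have hstop : ¬ ((0:Int) < N) := by omega
    rw [solveLoopA]
    simp [hstop, hN]
  · rw [if_neg hN]
    set T := PySem.List.sorted S (fun x => x) false with hT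
    have hlenT : T.length = S.length := PySem.List.length_sorted ..
    have hNlen : N ≤ (T.length : Int) := by
      rcases hpre with h | h
      · omega
      · omega
    have hclosed := solveLoopA_closed N T 0 0 (le_refl 0) hNlen
    have hpos : (0:Int) < N := by omega
    have hslice : PySem.List.slice T none (some N) = T.take N.toNat :=
      PySem.List.slice_to T (by omega)
    have hlen_take : (T.take N.toNat).length = N.toNat := by
      simp [List.length_take]; omega
    rw [hslice]
    congr 1
    rw [hclosed]
    by_cases hpar : N % 2 = 0
    · have hgN : PySem.List.pyGet? T (N - 1) = some T[(N-1).toNat] :=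
        PySem.List.pyGet?_eq_some_getElem _ (by omega)
          (by exact_mod_cast (by omega : N - 1 < (T.length : Int)))
      have hlast : (PySem.List.pyGet? (T.take N.toNat) (-1)).getD 0 = T[(N-1).toNat]'(by omega) := by
        rw [PySem.List.pyGet?_neg_one]
        have hg : (T.take N.toNat).getLast? = some ((T.take N.toNat)[N.toNat - 1]'(by omega)) := by
          rw [List.getLast?_eq_getElem?]
          rw [List.getElem?_eq_getElem (by omega)]
          simp [hlen_take]
        rw [hg]
        simp only [Option.getD_some]
        rw [List.getElem_take]
        congr 1
        omega
      have hpar' : (N - 0) % 2 = 0 := by omega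
      rw [if_pos hpar, hlast]
      rw [if_pos ⟨hpos, hpar'⟩, hgN]
      simp
    · have hpar' : ¬ (0 < N ∧ (N - 0) % 2 = 0) := by omega
      rw [if_neg hpar, if_neg hpar']
      simp
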